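-- pv_equiv track=rewrite | github.com/MOUNIKA-SRAVANTHI/form-the-string | office_roster.py | simulate_office_attendance
-- ===== SOURCE A (Python) =====
-- def simulate_office_attendance(num_employees, num_friendships, friendships, target_attendance):
--
--     daily_attendance = [1] * num_employees
--     friendship_network = [[] for _ in range(num_employees)]
--
--     for a, b in friendships:
--         friendship_network[a-1].append(b-1)
--         friendship_network[b-1].append(a-1)
--
--     total_attendance = 0
--     days = 0
--
--     while total_attendance < target_attendance:
--         days += 1
--
--         current_day_attendance = sum(daily_attendance)
--         total_attendance += current_day_attendance
--
--         if total_attendance >= target_attendance: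
--             break
--
--         next_day_attendance = [0] * num_employees
--
--         for i in range(num_employees):
--             if daily_attendance[i] == 1:
--                 office_friends = sum(1 for friend in friendship_network[i] if daily_attendance[friend] == 1)
--                 if office_friends == 3:
--                     next_day_attendance[i] = 1
--                 else:
--                     next_day_attendance[i] = 0
--             else:
--                 office_friends = sum(1 for friend in friendship_network[i] if daily_attendance[friend] == 1)
--                 if office_friends < 3:
--                     next_day_attendance[i] = 1
--                 else:
--                     next_day_attendance[i] = 0
--
--         daily_attendance = next_day_attendance
--
--     return days
-- ===== SOURCE B (Python) =====
-- def simulate_office_attendance(num_employees, num_friendships, friendships, target_attendance):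
--     # Cycle detection on the deterministic daily state, then an arithmetic jump
--     # over whole repeating cycles instead of simulating every day.
--     n = num_employees
--     adj = [[] for _ in range(n)]
--     for a, b in friendships:
--         adj[a - 1].append(b - 1)
--         adj[b - 1].append(a - 1)
--
--     def step(st):
--         nxt = []
--         for i in range(n):
--             present = sum(1 for f in adj[i] if st[f] == 1)
--             if st[i] == 1:
--                 nxt.append(1 if present == 3 else 0)
--             else:
--                 nxt.append(1 if present < 3 else 0)
--         return tuple(nxt)
--
--     if target_attendance <= 0:
--         return 0
--
--     state = tuple([1] * n)
--     cum = 0          # attendance accumulated before the current day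
--     day = 1          # current day number
--     seen = {}        # state -> (day it started, cum before that day)
--     while True:
--         if state in seen:
--             j, cj = seen[state]
--             L = day - j              # cycle length in days
--             S = cum - cj             # attendance gained per cycle (> 0 here)
--             R = target_attendance - cj
--             full = (R - 1) // S      # whole cycles to jump over
--             rem = R - full * S       # attendance still needed inside one cycle
--             q = 0
--             st = state
--             i = 0
--             while q < rem:
--                 i += 1
--                 q += sum(st)
--                 st = step(st)
--             return j - 1 + full * L + i
--         seen[state] = (day, cum)
--         s = sum(state)
--         if cum + s >= target_attendance:
--             return day
--         cum += s
--         state = step(state)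
--         day += 1
-- ===== Notes on version B (the rewrite author's own statement) =====
-- stated objective: alternative
-- what changed: A simulates the cellular automaton day by day until the cumulative attendance reaches the target; B memoises each daily state in a dictionary, detects the first repeated state, and jumps over all whole repetitions of the cycle with one floor division, walking at most one final partial cycle.
import Mathlib
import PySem

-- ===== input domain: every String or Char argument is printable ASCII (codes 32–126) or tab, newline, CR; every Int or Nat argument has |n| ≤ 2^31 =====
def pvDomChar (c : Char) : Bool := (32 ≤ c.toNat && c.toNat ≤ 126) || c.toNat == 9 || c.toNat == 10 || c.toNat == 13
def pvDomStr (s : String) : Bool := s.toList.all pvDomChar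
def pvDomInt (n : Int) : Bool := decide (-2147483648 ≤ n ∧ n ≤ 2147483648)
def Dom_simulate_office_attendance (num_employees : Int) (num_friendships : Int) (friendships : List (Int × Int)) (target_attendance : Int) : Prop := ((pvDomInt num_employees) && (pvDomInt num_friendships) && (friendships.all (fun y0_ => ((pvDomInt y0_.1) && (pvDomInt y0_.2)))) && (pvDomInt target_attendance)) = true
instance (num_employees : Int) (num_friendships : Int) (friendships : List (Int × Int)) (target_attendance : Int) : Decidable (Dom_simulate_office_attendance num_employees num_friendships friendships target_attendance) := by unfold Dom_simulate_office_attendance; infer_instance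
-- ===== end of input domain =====

-- B replaces A's day-by-day simulation with cycle detection on the deterministic
-- daily state plus an arithmetic jump over whole repeating daily-sum cycles.

-- ===== PORT A =====
-- Python `network[i].append(v)` with a possibly negative index: Python wraps a negative
-- index by adding the length; an index out of [-len, len) raises IndexError (excluded by
-- Pre_, where the port leaves the list unchanged).
def pvAppendAt (net : List (List Int)) (i : Int) (v : Int) : List (List Int) :=
  let j : Int := if i < 0 then i + net.length else i
  if 0 ≤ j ∧ j < net.length then net.modify j.toNat (fun l => l ++ [v]) else net

-- the `for a, b in friendships` adjacency-building loop (identical in A and in B)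
def pvBuildNet (N : Nat) (friendships : List (Int × Int)) : List (List Int) :=
  friendships.foldl
    (fun net ab => pvAppendAt (pvAppendAt net (ab.1 - 1) (ab.2 - 1)) (ab.2 - 1) (ab.1 - 1))
    (List.replicate N [])

-- one day of the cellular automaton: A's inner `for i in range(num_employees)` loop,
-- which B's Python repeats verbatim as its `step` helper.  `st[friend]` is read with
-- PySem.List.pyGet? (Python's negative-index wrap); `sum(1 for … if …)` is countP.
def pvStep (N : Nat) (net : List (List Int)) (st : List Int) : List Int :=
  (List.range N).map (fun i =>
    let friends := net.getD i []
    let present : Int := (friends.countP (fun f => PySem.List.pyGet? st f == some 1) : Int)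
    if st.getD i 0 = 1 then (if present = 3 then 1 else 0)
    else (if present < 3 then 1 else 0))

-- A's `while total_attendance < target_attendance` loop; the fuel only makes the
-- recursion total, Pre_ guarantees it is never exhausted.
def pvLoopA (t : Int) (N : Nat) (net : List (List Int)) : Nat → List Int → Int → Int → Int
  | 0, _, _, days => days
  | fuel+1, st, total, days =>
    if total < t then
      let s := st.sum
      if t ≤ total + s then days + 1
      else pvLoopA t N net fuel (pvStep N net st) (total + s) (days + 1)
    else days

def simulate_office_attendance (num_employees : Int) (num_friendships : Int) (friendships : List (Int × Int)) (target_attendance : Int) : Int :=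
  let N := num_employees.toNat
  let net := pvBuildNet N friendships
  pvLoopA target_attendance N net ((2 * target_attendance).toNat + 2) (List.replicate N 1) 0 0

-- ===== PORT B =====
-- B's inner `while q < rem` walk through one cycle (fuel = cycle length + 1 suffices)
def pvWalk (N : Nat) (net : List (List Int)) (rem : Int) : Nat → List Int → Int → Int → Int
  | 0, _, _, i => i
  | fuel+1, st, q, i =>
    if q < rem then pvWalk N net rem fuel (pvStep N net st) (q + st.sum) (i + 1) else i

-- B's `while True` loop with the `seen` dictionary and the cycle jump
def pvLoopB (t : Int) (N : Nat) (net : List (List Int)) : Nat → List Int → Int → Int → PySem.Dict (List Int) (Int × Int) → Int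
  | 0, _, _, _, _ => 0
  | fuel+1, st, cum, day, seen =>
    match seen.get? st with
    | some (j, cj) =>
      let L := day - j
      let S := cum - cj
      let R := t - cj
      let full := PySem.Int.floordiv (R - 1) S
      let rem := R - full * S
      j - 1 + full * L + pvWalk N net rem (L.toNat + 1) st 0 0
    | none =>
      let s := st.sum
      if t ≤ cum + s then day
      else pvLoopB t N net fuel (pvStep N net st) (cum + s) (day + 1) (seen.insert st (day, cum))

def simulate_office_attendance_alt (num_employees : Int) (num_friendships : Int) (friendships : List (Int × Int)) (target_attendance : Int) : Int :=
  let N := num_employees.toNat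
  let net := pvBuildNet N friendships
  if target_attendance ≤ 0 then 0
  else pvLoopB target_attendance N net ((2 * target_attendance).toNat + 2) (List.replicate N 1) 0 1 PySem.Dict.empty

-- ===== PRECONDITION & SPEC =====
-- Pre_ excludes exactly (a) friendship endpoints outside Python's index range [1-n, n],
-- where A raises IndexError, and (b) num_employees ≤ 0 with target_attendance > 0,
-- where the daily sum is 0 forever and A's while-loop never terminates.
def Pre_simulate_office_attendance (num_employees : Int) (num_friendships : Int) (friendships : List (Int × Int)) (target_attendance : Int) : Prop :=
  (1 ≤ num_employees ∨ target_attendance ≤ 0) ∧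
  ∀ p ∈ friendships, 1 - num_employees ≤ p.1 ∧ p.1 ≤ num_employees ∧
                     1 - num_employees ≤ p.2 ∧ p.2 ≤ num_employees

instance (num_employees : Int) (num_friendships : Int) (friendships : List (Int × Int)) (target_attendance : Int) : Decidable (Pre_simulate_office_attendance num_employees num_friendships friendships target_attendance) := by
  unfold Pre_simulate_office_attendance; infer_instance

def pvWitness_simulate_office_attendance : Int × Int × (List (Int × Int)) × Int := (2, 1, [(1, 2)], 5)

def Spec_simulate_office_attendance (num_employees : Int) (num_friendships : Int) (friendships : List (Int × Int)) (target_attendance : Int) (out : Int) : Prop := out = simulate_office_attendance_alt num_employees num_friendships friendships target_attendance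
instance (num_employees : Int) (num_friendships : Int) (friendships : List (Int × Int)) (target_attendance : Int) (out : Int) : Decidable (Spec_simulate_office_attendance num_employees num_friendships friendships target_attendance out) := by unfold Spec_simulate_office_attendance; infer_instance

-- ===== CLAIM (what is proved, stated in full; the proofs are below) =====
def Claim_equal_simulate_office_attendance : Prop := ∀ (num_employees : Int) (num_friendships : Int) (friendships : List (Int × Int)) (target_attendance : Int), Dom_simulate_office_attendance num_employees num_friendships friendships target_attendance → Pre_simulate_office_attendance num_employees num_friendships friendships target_attendance → Spec_simulate_office_attendance num_employees num_friendships friendships target_attendance (simulate_office_attendance num_employees num_friendships friendships target_attendance)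

-- ===== LEMMAS AND PROOFS =====

-- the state at the start of day k+1 (T 0 = all ones)
def pvT (N : Nat) (net : List (List Int)) : Nat → List Int
  | 0 => List.replicate N 1
  | k+1 => pvStep N net (pvT N net k)

-- cumulative attendance after d days
def pvP (N : Nat) (net : List (List Int)) (d : Nat) : Int :=
  ∑ i ∈ Finset.range d, (pvT N net i).sum

theorem pvP_succ (N : Nat) (net : List (List Int)) (d : Nat) :
    pvP N net (d+1) = pvP N net d + (pvT N net d).sum := by
  simp [pvP, Finset.sum_range_succ]

theorem pvT_mem01 (N : Nat) (net : List (List Int)) (k : Nat) :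
    ∀ x ∈ pvT N net k, x = 0 ∨ x = 1 := by
  cases k with
  | zero => intro x hx; right; exact (List.eq_of_mem_replicate hx)
  | succ k =>
    intro x hx
    simp only [pvT, pvStep, List.mem_map] at hx
    obtain ⟨i, _, hi⟩ := hx
    split_ifs at hi <;> omega

theorem pvT_sum_nonneg (N : Nat) (net : List (List Int)) (k : Nat) :
    0 ≤ (pvT N net k).sum := by
  apply List.sum_nonneg
  intro x hx
  rcases pvT_mem01 N net k x hx with h | h <;> omega

theorem pvStep_all_zero (N : Nat) (net : List (List Int)) (st : List Int)
    (h : ∀ x ∈ st, x = 0) : pvStep N net st = List.replicate N 1 := by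
  have hget : ∀ i : Nat, st.getD i 0 = 0 := by
    intro i
    rcases Nat.lt_or_ge i st.length with hlt | hge
    · rw [List.getD_eq_getElem?_getD, List.getElem?_eq_getElem hlt]
      exact h _ (List.getElem_mem hlt)
    · rw [List.getD_eq_getElem?_getD, List.getElem?_eq_none (by omega)]
      rfl
  have hcount : ∀ l : List Int, l.countP (fun f => PySem.List.pyGet? st f == some 1) = 0 := by
    intro l
    apply List.countP_eq_zero.mpr
    intro f _
    simp only [beq_iff_eq]
    intro hsome
    have := h _ (PySem.List.mem_of_pyGet?_eq_some st hsome)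
    omega
  unfold pvStep
  have : ∀ i ∈ List.range N,
      (let friends := net.getD i []
       let present : Int := (friends.countP (fun f => PySem.List.pyGet? st f == some 1) : Int)
       if st.getD i 0 = 1 then (if present = 3 then 1 else 0)
       else (if present < 3 then (1:Int) else 0)) = 1 := by
    intro i _
    simp only [hget i, hcount]
    norm_num
  rw [List.map_congr_left this]
  simp [List.map_const']

theorem pvT_sum_zero_step (N : Nat) (net : List (List Int)) (k : Nat)
    (h : (pvT N net k).sum = 0) : pvT N net (k+1) = List.replicate N 1 := by
  have hz : ∀ x ∈ pvT N net k, x = 0 := by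
    intro x hx
    exact List.all_zero_of_le_zero_le_of_sum_eq_zero
      (fun x hx => by rcases pvT_mem01 N net k x hx with h1 | h1 <;> omega) h hx
  show pvStep N net (pvT N net k) = List.replicate N 1
  exact pvStep_all_zero N net _ hz

theorem pvP_mono (N : Nat) (net : List (List Int)) {d d' : Nat} (h : d ≤ d') :
    pvP N net d ≤ pvP N net d' := by
  induction d' with
  | zero =>
    have h0 : d = 0 := by omega
    simp [h0]
  | succ d' ih =>
    rcases Nat.lt_or_ge d (d'+1) with hlt | hge
    · calc pvP N net d ≤ pvP N net d' := ih (by omega)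
        _ ≤ pvP N net (d'+1) := by
            rw [pvP_succ]; have := pvT_sum_nonneg N net d'; omega
    · have : d = d' + 1 := by omega
      simp [this]

theorem pvP_growth (N : Nat) (net : List (List Int)) (hN : 1 ≤ N) (k : Nat) :
    (k : Int) ≤ pvP N net (2 * k) := by
  induction k with
  | zero => simp [pvP]
  | succ k ih =>
    have h2 : 2 * (k+1) = 2*k + 1 + 1 := by omega
    rw [h2, pvP_succ, pvP_succ]
    have hpair : 1 ≤ (pvT N net (2*k)).sum + (pvT N net (2*k+1)).sum := by
      rcases Int.lt_or_le 0 ((pvT N net (2*k)).sum) with hpos | hle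
      · have := pvT_sum_nonneg N net (2*k+1); omega
      · have hz : (pvT N net (2*k)).sum = 0 :=
          le_antisymm hle (pvT_sum_nonneg N net (2*k))
        have : pvT N net (2*k+1) = List.replicate N 1 := pvT_sum_zero_step N net _ hz
        rw [hz, this]
        simp only [List.sum_replicate, nsmul_eq_mul, mul_one]
        omega
    push_cast
    omega

-- ===== A's loop returns the least d with target ≤ P d =====
theorem pvLoopA_correct (t : Int) (N : Nat) (net : List (List Int))
    (hex : ∃ d, t ≤ pvP N net d) :
    ∀ fuel k, (∀ i, i < k → pvP N net i < t) → Nat.find hex < k + fuel →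
      pvLoopA t N net fuel (pvT N net k) (pvP N net k) (k : Int) = (Nat.find hex : Int) := by
  intro fuel
  induction fuel with
  | zero =>
    intro k hk hfuel
    exfalso
    have := hk _ (by omega : Nat.find hex < k)
    have := Nat.find_spec hex
    omega
  | succ fuel ih =>
    intro k hk hfuel
    rw [pvLoopA]
    rcases Int.lt_or_le (pvP N net k) t with hlt | hge
    · rw [if_pos hlt]
      have hsum : pvP N net k + (pvT N net k).sum = pvP N net (k+1) := (pvP_succ N net k).symm
      rcases Int.lt_or_le (pvP N net k + (pvT N net k).sum) t with hlt2 | hge2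
      · rw [if_neg (by omega)]
        have hk' : ∀ i, i < k + 1 → pvP N net i < t := by
          intro i hi
          rcases Nat.lt_or_ge i k with h | h
          · exact hk i h
          · have : i = k := by omega
            simpa [this] using hlt
        have := ih (k+1) hk' (by omega)
        rw [hsum]
        show pvLoopA t N net fuel (pvT N net (k+1)) (pvP N net (k+1)) ((k : Int) + 1) = _
        rw [(by push_cast; ring : ((k : Int) + 1) = ((k+1 : Nat) : Int))]
        exact this
      · rw [if_pos (by omega)]
        have : Nat.find hex = k + 1 := by
          rw [Nat.find_eq_iff]
          constructor
          · rw [← hsum]; exact hge2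
          · intro m hm
            push_neg
            rcases Nat.lt_or_ge m k with h | h
            · exact hk m h
            · have : m = k := by omega
              simpa [this] using hlt
        rw [this]; push_cast; ring
    · rw [if_neg (by omega)]
      have : Nat.find hex = k := by
        rw [Nat.find_eq_iff]
        exact ⟨hge, fun m hm => by push_neg; exact hk m hm⟩
      rw [this]

-- ===== periodicity after a repeated state =====
theorem pvT_shift (N : Nat) (net : List (List Int)) {i k : Nat}
    (h : pvT N net i = pvT N net k) (m : Nat) : pvT N net (i + m) = pvT N net (k + m) := by
  induction m with
  | zero => simpa using h
  | succ m ih =>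
    show pvStep N net (pvT N net (i+m)) = pvStep N net (pvT N net (k+m))
    rw [ih]

theorem pvP_shift (N : Nat) (net : List (List Int)) {i k : Nat} (hik : i ≤ k)
    (h : pvT N net i = pvT N net k) (r : Nat) :
    pvP N net (i + r + (k - i)) = pvP N net (i + r) + (pvP N net k - pvP N net i) := by
  induction r with
  | zero =>
    have : i + 0 + (k - i) = k := by omega
    rw [this]; simp
  | succ r ih =>
    have e1 : i + (r+1) + (k - i) = (i + r + (k - i)) + 1 := by omega
    rw [e1, pvP_succ, ih, (by omega : i + (r+1) = (i + r) + 1), pvP_succ]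
    have hs : pvT N net (i + r + (k - i)) = pvT N net (i + r) := by
      have := pvT_shift N net h r
      have e2 : i + r + (k - i) = k + r := by omega
      rw [e2, ← this]
    rw [hs]; ring

theorem pvP_shift_mul (N : Nat) (net : List (List Int)) {i k : Nat} (hik : i ≤ k)
    (h : pvT N net i = pvT N net k) (m r : Nat) :
    pvP N net (i + m * (k - i) + r) =
      pvP N net (i + r) + (m : Int) * (pvP N net k - pvP N net i) := by
  induction m with
  | zero => simp
  | succ m ih =>
    have e1 : i + (m+1) * (k - i) + r = i + (m * (k - i) + r) + (k - i) := by ring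
    rw [e1, pvP_shift N net hik h (m * (k - i) + r)]
    have e2 : i + (m * (k - i) + r) = i + m * (k - i) + r := by omega
    rw [e2, ih]
    push_cast; ring

-- the cycle gains at least one unit of attendance (1 ≤ N)
theorem pvCycle_pos (N : Nat) (net : List (List Int)) (hN : 1 ≤ N) {i k : Nat}
    (hik : i < k) (h : pvT N net i = pvT N net k) :
    1 ≤ pvP N net k - pvP N net i := by
  by_contra hcon
  push_neg at hcon
  have hS0 : pvP N net k = pvP N net i :=
    le_antisymm (by omega) (pvP_mono N net (by omega))
  have hsz : ∀ a, i ≤ a → a < k → (pvT N net a).sum = 0 := by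
    intro a ha hak
    have h1 : pvP N net i ≤ pvP N net a := pvP_mono N net ha
    have h2 : pvP N net (a+1) ≤ pvP N net k := pvP_mono N net (by omega)
    have h3 := pvP_succ N net a
    have h4 : pvP N net a ≤ pvP N net (a+1) := pvP_mono N net (by omega)
    have := pvT_sum_nonneg N net a
    omega
  have hsi : (pvT N net i).sum = 0 := hsz i le_rfl hik
  have hstep : pvT N net (i+1) = List.replicate N 1 := pvT_sum_zero_step N net i hsi
  have hsum1 : (pvT N net (i+1)).sum = (N : Int) := by
    rw [hstep]; simp [List.sum_replicate, nsmul_eq_mul]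
  rcases Nat.lt_or_ge (i+1) k with hlt | hge
  · have := hsz (i+1) (by omega) hlt
    omega
  · have hk1 : k = i + 1 := by omega
    have : (pvT N net k).sum = 0 := by rw [← h]; exact hsi
    rw [hk1] at this
    omega

-- ===== B's walk returns the least i with rem ≤ P (k+i) - P k =====
theorem pvWalk_correct (N : Nat) (net : List (List Int)) (rem : Int) (k : Nat)
    (hex : ∃ r, rem ≤ pvP N net (k + r) - pvP N net k) :
    ∀ fuel i, i ≤ Nat.find hex → Nat.find hex ≤ i + fuel →
      pvWalk N net rem fuel (pvT N net (k + i)) (pvP N net (k + i) - pvP N net k) (i : Int)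
        = (Nat.find hex : Int) := by
  intro fuel
  induction fuel with
  | zero =>
    intro i h1 h2
    have : i = Nat.find hex := by omega
    rw [pvWalk, this]
  | succ fuel ih =>
    intro i h1 h2
    rw [pvWalk]
    rcases Int.lt_or_le (pvP N net (k + i) - pvP N net k) rem with hlt | hge
    · rw [if_pos hlt]
      have hne : i ≠ Nat.find hex := by
        intro he
        have := Nat.find_spec hex
        rw [← he] at this
        omega
      have hsum : pvP N net (k + i) - pvP N net k + (pvT N net (k + i)).sum
          = pvP N net (k + (i+1)) - pvP N net k := by
        rw [(by omega : k + (i+1) = (k + i) + 1), pvP_succ]; ring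
      have := ih (i+1) (by omega) (by omega)
      rw [hsum]
      show pvWalk N net rem fuel (pvT N net (k + (i+1))) _ ((i : Int) + 1) = _
      rw [(by push_cast; ring : ((i : Int) + 1) = ((i+1 : Nat) : Int))]
      exact this
    · rw [if_neg (by omega)]
      have : Nat.find hex ≤ i := Nat.find_le hge
      have : i = Nat.find hex := by omega
      rw [this]

-- the dictionary invariant carried by B's outer loop
def pvInv (N : Nat) (net : List (List Int)) (seen : PySem.Dict (List Int) (Int × Int)) (k : Nat) : Prop :=
  (∀ x, seen.get? x = none ↔ ∀ i, i < k → pvT N net i ≠ x) ∧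
  (∀ i, i < k → seen.get? (pvT N net i) = some ((i : Int) + 1, pvP N net i))

-- ===== B's loop returns the least d with target ≤ P d =====
theorem pvLoopB_correct (t : Int) (N : Nat) (net : List (List Int)) (hN : 1 ≤ N)
    (hex : ∃ d, t ≤ pvP N net d) :
    ∀ fuel k seen, pvInv N net seen k → (∀ i, i ≤ k → pvP N net i < t) →
      Nat.find hex ≤ k + fuel →
      pvLoopB t N net fuel (pvT N net k) (pvP N net k) ((k : Int) + 1) seen
        = (Nat.find hex : Int) := by
  intro fuel
  induction fuel with
  | zero =>
    intro k seen hinv hk hfuel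
    exfalso
    have := hk _ (by omega : Nat.find hex ≤ k)
    have := Nat.find_spec hex
    omega
  | succ fuel ih =>
    intro k seen hinv hk hfuel
    rw [pvLoopB]
    rcases hget : seen.get? (pvT N net k) with _ | ⟨j, cj⟩
    · -- state not seen before: one ordinary day
      simp only
      have hfresh : ∀ i, i < k → pvT N net i ≠ pvT N net k := (hinv.1 _).mp hget
      have hsum : pvP N net k + (pvT N net k).sum = pvP N net (k+1) := (pvP_succ N net k).symm
      rcases Int.lt_or_le (pvP N net k + (pvT N net k).sum) t with hlt2 | hge2
      · rw [if_neg (by omega)]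
        have hinv' : pvInv N net (seen.insert (pvT N net k) ((k : Int) + 1, pvP N net k)) (k+1) := by
          constructor
          · intro x
            rw [PySem.Dict.get?_insert]
            split_ifs with hx
            · constructor
              · intro h; cases h
              · intro h
                exact absurd (h k (by omega) (by rw [hx])) (by simp)
            · rw [hinv.1 x]
              constructor
              · intro h i hi
                rcases Nat.lt_or_ge i k with h' | h'
                · exact h i h'
                · have : i = k := by omega
                  rw [this]; intro he; exact hx he.symm
              · intro h i hi; exact h i (by omega)
          · intro i hi
            rw [PySem.Dict.get?_insert]
            rcases Nat.lt_or_ge i k with h' | h'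
            · rw [if_neg (fun he => hfresh i h' he), hinv.2 i h']
            · have : i = k := by omega
              rw [this, if_pos rfl]
        have hk' : ∀ i, i ≤ k + 1 → pvP N net i < t := by
          intro i hi
          rcases Nat.lt_or_ge i (k+1) with h' | h'
          · exact hk i (by omega)
          · have : i = k + 1 := by omega
            rw [this, ← hsum]; omega
        have := ih (k+1) _ hinv' hk' (by omega)
        rw [hsum]
        show pvLoopB t N net fuel (pvT N net (k+1)) (pvP N net (k+1)) ((k : Int) + 1 + 1) _ = _
        rw [(by push_cast; ring : ((k : Int) + 1 + 1) = ((k+1 : Nat) : Int) + 1)]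
        exact this
      · rw [if_pos (by omega)]
        have : Nat.find hex = k + 1 := by
          rw [Nat.find_eq_iff]
          constructor
          · rw [← hsum]; exact hge2
          · intro m hm; push_neg; exact hk m (by omega)
        rw [this]; push_cast; ring
    · -- repeated state: jump over whole cycles, then walk the last partial cycle
      simp only
      -- identify the first occurrence
      have hnotnone : ¬ (∀ i, i < k → pvT N net i ≠ pvT N net k) := by
        intro h
        rw [← hinv.1 (pvT N net k)] at h
        rw [hget] at h; cases h
      push_neg at hnotnone
      obtain ⟨i, hik, hTi⟩ := hnotnone
      have hlook := hinv.2 i hik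
      rw [hTi, hget] at hlook
      have hpair : j = (i : Int) + 1 ∧ cj = pvP N net i := by
        simpa [Prod.ext_iff] using hlook
      obtain ⟨hj, hcj⟩ := hpair
      subst hj hcj
      have hTik : pvT N net i = pvT N net k := hTi
      -- abbreviations
      set S : Int := pvP N net k - pvP N net i with hS
      set R : Int := t - pvP N net i with hR
      have hSpos : 1 ≤ S := pvCycle_pos N net hN hik hTik
      have hRpos : 1 ≤ R := by
        have := hk i (by omega)
        omega
      set full : Int := PySem.Int.floordiv (R - 1) S with hfull
      have hdiv := PySem.Int.floordiv_mul_add_mod (R - 1) S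
      rw [← hfull] at hdiv
      have hm0 := PySem.Int.mod_nonneg (R - 1) (by omega : (0:Int) < S)
      have hm1 := PySem.Int.mod_lt (R - 1) (by omega : (0:Int) < S)
      set rem : Int := R - full * S with hrem
      have hrem1 : 1 ≤ rem := by rw [hrem]; omega
      have hremS : rem ≤ S := by rw [hrem]; omega
      have hfull0 : 0 ≤ full := by
        by_contra hneg
        push_neg at hneg
        have : full * S ≤ -1 * S := by
          apply mul_le_mul_of_nonneg_right (by omega) (by omega)
        omega
      set Lnat : Nat := k - i with hLnat
      have hLnat' : Lnat = k - i := hLnat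
      -- the walk
      have hPkL : pvP N net (k + Lnat) - pvP N net k = S := by
        have := pvP_shift N net (le_of_lt hik) hTik Lnat
        have e : i + Lnat + (k - i) = k + Lnat := by omega
        have e2 : i + Lnat = k := by omega
        rw [e, e2] at this
        omega
      have hex2 : ∃ r, rem ≤ pvP N net (k + r) - pvP N net k := ⟨Lnat, by omega⟩
      set I : Nat := Nat.find hex2 with hI
      have hIL : I ≤ Lnat := Nat.find_le (by omega)
      have hI1 : 1 ≤ I := by
        rcases Nat.eq_zero_or_pos I with h0 | h
        · exfalso
          have hspec := Nat.find_spec hex2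
          rw [← hI] at hspec
          rw [h0] at hspec
          simp at hspec
          omega
        · exact h
      -- P measured from k equals P measured from i, shifted by S
      have hPk_of_Pi : ∀ r : Nat, pvP N net (k + r) - pvP N net k = pvP N net (i + r) - pvP N net i := by
        intro r
        have := pvP_shift N net (le_of_lt hik) hTik r
        have e : i + r + (k - i) = k + r := by omega
        rw [e] at this
        omega
      have hfullcast : ((full.toNat : Int)) = full := Int.toNat_of_nonneg hfull0
      -- the answer
      have hAns : Nat.find hex = i + full.toNat * Lnat + I := by
        rw [Nat.find_eq_iff]
        constructor
        · -- t ≤ P at the landing day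
          have hmul := pvP_shift_mul N net (le_of_lt hik) hTik full.toNat I
          rw [hfullcast, ← hS, ← hLnat'] at hmul
          have hIprop := Nat.find_spec hex2
          rw [← hI] at hIprop
          rw [hPk_of_Pi I] at hIprop
          rw [hmul]
          omega
        · -- every earlier day falls short
          intro m hm
          push_neg
          have hmle : m ≤ i + full.toNat * Lnat + (I - 1) := by omega
          have hmono := pvP_mono N net hmle
          have hmul := pvP_shift_mul N net (le_of_lt hik) hTik full.toNat (I - 1)
          rw [hfullcast, ← hS, ← hLnat'] at hmul
          have hImin := Nat.find_min hex2 (by omega : I - 1 < Nat.find hex2)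
          push_neg at hImin
          rw [hPk_of_Pi (I - 1)] at hImin
          rw [hmul] at hmono
          omega
      -- evaluate the walk
      have hwalk : pvWalk N net rem (Lnat + 1) (pvT N net k) 0 0 = (I : Int) := by
        have h := pvWalk_correct N net rem k hex2 (Lnat + 1) 0 (by omega) (by omega)
        rw [← hI] at h
        have h2 : pvP N net (k + 0) - pvP N net k = 0 := sub_self _
        rw [h2] at h
        exact h
      -- assemble the returned value
      have hLcast : ((k : Int) + 1 - ((i : Int) + 1)).toNat = Lnat := by omega
      rw [hLcast, hwalk, hAns]
      push_cast
      rw [hfullcast]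
      have : ((Lnat : Int)) = (k : Int) - (i : Int) := by omega
      rw [this]
      ring

theorem pvP_zero (N : Nat) (net : List (List Int)) : pvP N net 0 = 0 := by simp [pvP]

-- ===== VERDICT (by name: the statement is the Claim_ definition above) =====
theorem simulate_office_attendance_spec : Claim_equal_simulate_office_attendance := by
  intro ne nf fr t _ hpre
  unfold Spec_simulate_office_attendance
  unfold simulate_office_attendance simulate_office_attendance_alt
  set N := ne.toNat with hNdef
  set net := pvBuildNet N fr with hnet
  rcases Int.lt_or_le 0 t with hpos | hle
  case inr =>
    -- no day is needed: both sides return 0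
    rw [if_pos hle]
    have hfuel : (2 * t).toNat + 2 = ((2 * t).toNat + 1) + 1 := rfl
    rw [hfuel, pvLoopA, if_neg (by omega)]
  case inl =>
    rw [if_neg (by omega)]
    have hne : 1 ≤ ne := by
      rcases hpre.1 with h | h
      · exact h
      · omega
    have hN : 1 ≤ N := by omega
    have hex : ∃ d, t ≤ pvP N net d := by
      refine ⟨2 * t.toNat, ?_⟩
      have := pvP_growth N net hN t.toNat
      omega
    have hfind : Nat.find hex ≤ 2 * t.toNat := Nat.find_le (by
      have := pvP_growth N net hN t.toNat
      omega)
    have hA : pvLoopA t N net ((2 * t).toNat + 2) (List.replicate N 1) 0 0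
        = (Nat.find hex : Int) := by
      have := pvLoopA_correct t N net hex ((2 * t).toNat + 2) 0
        (by intro i hi; omega) (by omega)
      simpa [pvT, pvP_zero] using this
    have hB : pvLoopB t N net ((2 * t).toNat + 2) (List.replicate N 1) 0 1 PySem.Dict.empty
        = (Nat.find hex : Int) := by
      have hinv : pvInv N net PySem.Dict.empty 0 := by
        constructor
        · intro x
          simp [PySem.Dict.get?_empty]
        · intro i hi; omega
      have := pvLoopB_correct t N net hN hex ((2 * t).toNat + 2) 0 PySem.Dict.empty hinv
        (by intro i hi; have h0 : i = 0 := Nat.le_zero.mp hi; rw [h0, pvP_zero]; omega) (by omega)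
      simpa [pvT, pvP_zero] using this
    rw [hA, hB]
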